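-- pv_equiv track=rewrite | github.com/ingridfsl/listas-p1-ufpe | Lista 4 - Funções e Escopo de Variável/2- A caminho de Shichikokuyama.py | split_palavra
-- ===== SOURCE A (Python) =====
-- def split_palavra(palavra):
-- 	vogais = ['a', 'e', 'i', 'o', 'u']
-- 	count = 0
-- 	silabas = []
-- 	for index in range(len(palavra)):
-- 		if palavra[index] in vogais:
-- 			silabas.append(palavra[count:index + 1])
-- 			count = index + 1
-- 	return silabas
-- ===== SOURCE B (Python) =====
-- def split_palavra(palavra):
--     silabas = []
--     buf = []
--     for ch in palavra:
--         buf.append(ch)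
--         if ch in 'aeiou':
--             silabas.append(''.join(buf))
--             buf = []
--     return silabas
-- ===== Notes on version B (the rewrite author's own statement) =====
-- stated objective: simpler
-- what changed: A tracks a chunk-start index and re-slices the string at every vowel; B keeps no indices at all, accumulating characters into a buffer that is emitted and reset whenever a vowel arrives.
import Mathlib
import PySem

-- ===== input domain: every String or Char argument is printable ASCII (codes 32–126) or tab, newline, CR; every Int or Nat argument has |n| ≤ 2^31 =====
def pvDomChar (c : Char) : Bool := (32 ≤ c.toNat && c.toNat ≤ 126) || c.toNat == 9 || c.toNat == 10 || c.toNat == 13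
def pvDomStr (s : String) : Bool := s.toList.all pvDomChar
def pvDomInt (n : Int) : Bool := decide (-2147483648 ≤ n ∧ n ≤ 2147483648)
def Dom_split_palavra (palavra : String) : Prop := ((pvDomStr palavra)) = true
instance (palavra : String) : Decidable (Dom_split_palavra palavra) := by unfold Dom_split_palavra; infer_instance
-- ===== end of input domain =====

-- B replaces A's index/count/slice bookkeeping by an index-free buffer that is
-- emitted and reset at each vowel; same return value on every input (simpler).

-- ===== PORT A =====
-- A's local list 'vogais'
def pvVogais : List Char := ['a', 'e', 'i', 'o', 'u']

-- the body of A's for-loop over range(len(palavra)); state = (count, silabas)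
def pvAStep (cs : List Char) (st : Int × List String) (index : Int) : Int × List String :=
  if PySem.List.pyGetD cs index ' ' ∈ pvVogais then
    (index + 1,
     st.2 ++ [String.ofList (PySem.List.slice cs (some st.1) (some (index + 1)))])
  else st

-- port of A over palavra.toList (string indexing/slicing done on the char list)
def split_palavra (palavra : String) : List String :=
  ((PySem.List.pyRange 0 (palavra.toList.length : Int) 1).foldl
      (pvAStep palavra.toList) (0, [])).2

-- ===== PORT B =====
-- B's loop: 'acc' is the buffer 'buf'; a vowel completes a chunk, which is
-- emitted and the buffer reset; leftover characters after the last vowel are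
-- never emitted.
def pvFindall : List Char → List Char → List String
  | [], _ => []
  | c :: rest, acc =>
    if c ∈ pvVogais then String.ofList (acc ++ [c]) :: pvFindall rest []
    else pvFindall rest (acc ++ [c])

def split_palavra_alt (palavra : String) : List String :=
  pvFindall palavra.toList []

-- ===== PRECONDITION & SPEC =====
def Spec_split_palavra (palavra : String) (out : List String) : Prop := out = split_palavra_alt palavra
instance (palavra : String) (out : List String) : Decidable (Spec_split_palavra palavra out) := by unfold Spec_split_palavra; infer_instance

-- ===== CLAIM (what is proved, stated in full; the proofs are below) =====
def Claim_equal_split_palavra : Prop := ∀ (palavra : String), Dom_split_palavra palavra → Spec_split_palavra palavra (split_palavra palavra)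

-- ===== LEMMAS AND PROOFS =====

-- A's loop, started at index k with pending-chunk start 'count', yields the
-- already-emitted chunks followed by B's matches on the unread suffix, where
-- B's accumulator holds exactly the pending characters cs[count:k].
theorem pvLoop_eq (cs : List Char) :
    ∀ (rest : List Char) (k count : Nat) (sil : List String),
      count ≤ k → cs.drop k = rest →
      ((PySem.List.pyRange (k : Int) (cs.length : Int) 1).foldl (pvAStep cs)
          ((count : Int), sil)).2
        = sil ++ pvFindall rest ((cs.drop count).take (k - count)) := by
  intro rest
  induction rest with
  | nil =>
    intro k count sil hck hdrop
    have hk : cs.length ≤ k := by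
      by_contra h
      have := List.drop_eq_nil_iff.mp hdrop
      omega
    rw [PySem.List.pyRange_one_eq_nil (by exact_mod_cast hk)]
    simp [pvFindall]
  | cons c rest ih =>
    intro k count sil hck hdrop
    have hk : k < cs.length := by
      by_contra h
      rw [List.drop_eq_nil_iff.mpr (by omega)] at hdrop
      exact List.cons_ne_nil _ _ hdrop.symm
    have hget : cs[k]? = some c := by
      have : (cs.drop k)[0]? = some c := by rw [hdrop]; rfl
      simpa using this
    have hgetE : cs[k]'hk = c := by
      have := List.getElem?_eq_getElem (l := cs) (i := k) hk
      rw [hget] at this; exact (Option.some.inj this).symm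
    have hdrop' : cs.drop (k + 1) = rest := by
      have : (cs.drop k).drop 1 = rest := by rw [hdrop]; rfl
      simpa [List.drop_drop] using this
    rw [PySem.List.pyRange_one_cons (by exact_mod_cast hk)]
    rw [List.foldl_cons]
    have htake : (cs.drop count).take (k + 1 - count)
        = (cs.drop count).take (k - count) ++ [c] := by
      have hidx : (cs.drop count)[k - count]? = some c := by
        rw [List.getElem?_drop]
        have : count + (k - count) = k := by omega
        rw [this, hget]
      have : k + 1 - count = (k - count) + 1 := by omega
      rw [this, List.take_add_one, hidx]
      rfl
    by_cases hv : c ∈ pvVogais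
    · have hslice : PySem.List.slice cs (some (count : Int)) (some ((k : Int) + 1))
          = (cs.drop count).take (k + 1 - count) := by
        have hcast : ((k : Int) + 1) = ((k + 1 : Nat) : Int) := by push_cast; ring
        rw [hcast, PySem.List.slice_natCast]
      have hstep : pvAStep cs ((count : Int), sil) (k : Int)
          = (((k + 1 : Nat) : Int),
             sil ++ [String.ofList ((cs.drop count).take (k - count) ++ [c])]) := by
        unfold pvAStep
        rw [PySem.List.pyGetD_eq_getElem cs ' ' (by positivity) (by exact_mod_cast hk)]
        simp only [Int.toNat_natCast, hgetE, hv, if_pos]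
        rw [hslice, htake]
        push_cast; ring_nf
      rw [hstep, show ((k : Int) + 1) = ((k + 1 : Nat) : Int) by push_cast; ring,
          ih (k + 1) (k + 1)
            (sil ++ [String.ofList ((cs.drop count).take (k - count) ++ [c])])
            (le_refl _) hdrop']
      simp [pvFindall, hv]
    · have hstep : pvAStep cs ((count : Int), sil) (k : Int) = ((count : Int), sil) := by
        unfold pvAStep
        rw [PySem.List.pyGetD_eq_getElem cs ' ' (by positivity) (by exact_mod_cast hk)]
        simp [Int.toNat_natCast, hgetE, hv]
      rw [hstep]
      have hkc : ((k : Int) + 1) = ((k + 1 : Nat) : Int) := by push_cast; ring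
      rw [hkc, ih (k + 1) count sil (by omega) hdrop', htake]
      simp [pvFindall, hv]

-- ===== VERDICT (by name: the statement is the Claim_ definition above) =====
theorem split_palavra_spec : Claim_equal_split_palavra := by
  intro palavra _
  unfold Spec_split_palavra split_palavra split_palavra_alt
  have := pvLoop_eq palavra.toList palavra.toList 0 0 [] (le_refl _) (by simp)
  simpa using this
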